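-- pv_equiv track=rewrite | github.com/gracielnunciob/XLB48 | Notebooks/Training/XLB.py | extract_rules
-- ===== SOURCE A (Python) =====
-- def extract_rules(rules):
--     line = []
--     lines = []
--     for i in rules:
--         if i != '\n' and not i == '|' and not i == '-':
--             line.append(i)
--         if i == '\n':
--             str_line = ''.join(str(e) for e in line)
--             str_line = str_line.lstrip()
--             lines.append(str_line)
--             line = []
--
--     counter = 0
--     rule_sets = {}
--     rule_set = []
--     for i in lines:
--         rule_set.append(i)
--         if 'class' in i:
--             rule_sets[str(counter)] = rule_set
--             counter+=1
--             rule_set = []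
--     return rule_sets
-- ===== SOURCE B (Python) =====
-- def extract_rules(rules):
--     # Phase 1: cut the token list at each exact "\n" token using index/slice
--     # arithmetic; anything after the last "\n" token is discarded.
--     lines = []
--     rest = list(rules)
--     while "\n" in rest:
--         j = rest.index("\n")
--         lines.append(''.join(t for t in rest[:j] if t != '|' and t != '-').lstrip())
--         rest = rest[j + 1:]
--     # Phase 2: slice lines at each line containing 'class'; anything after the
--     # last such line is discarded.
--     rule_sets = {}
--     start = 0
--     n = 0
--     for k, ln in enumerate(lines):
--         if 'class' in ln:
--             rule_sets[str(n)] = lines[start:k + 1]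
--             n += 1
--             start = k + 1
--     return rule_sets
-- ===== Notes on version B (the rewrite author's own statement) =====
-- stated objective: alternative
-- what changed: Replaces A's single-pass per-token accumulator scanner and pending rule_set accumulator with index/slice arithmetic: phase 1 repeatedly cuts the token list at the first "\n" via index() and slicing, phase 2 groups by slicing lines[start:k+1] at each line containing 'class' instead of accumulating a pending list.
import Mathlib
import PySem

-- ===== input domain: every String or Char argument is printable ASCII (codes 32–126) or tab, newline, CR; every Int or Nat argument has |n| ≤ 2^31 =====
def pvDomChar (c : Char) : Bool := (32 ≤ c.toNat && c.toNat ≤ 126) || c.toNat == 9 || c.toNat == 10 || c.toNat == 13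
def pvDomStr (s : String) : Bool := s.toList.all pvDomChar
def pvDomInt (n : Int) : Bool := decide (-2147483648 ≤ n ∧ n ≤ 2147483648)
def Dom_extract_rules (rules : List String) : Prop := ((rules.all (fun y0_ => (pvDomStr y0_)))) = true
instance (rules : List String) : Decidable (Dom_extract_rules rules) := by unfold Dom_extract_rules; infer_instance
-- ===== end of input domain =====

-- B replaces A's accumulator-based token scanner and group collector by index/slice
-- arithmetic (cut at each "\n" token via index(), group by slices at 'class' lines);
-- objective: alternative decomposition, same cost.

-- ===== PORT A =====
-- one loop step of A's phase 1 (append token unless '\n'/'|'/'-', flush on '\n');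
-- ''.join(str(e) for e in line) on strings is Str.join "" line
def pvStepLine (st : List String × List String) (i : String) : List String × List String :=
  let line := if i ≠ "\n" ∧ ¬ (i = "|") ∧ ¬ (i = "-") then st.1 ++ [i] else st.1
  if i = "\n" then ([], st.2 ++ [PySem.Str.lstrip (PySem.Str.join "" line)])
  else (line, st.2)

-- one loop step of A's phase 2 (state: counter, rule_sets, rule_set)
def pvStepGroup (st : Int × PySem.Dict String (List String) × List String) (i : String) :
    Int × PySem.Dict String (List String) × List String :=
  let rule_set := st.2.2 ++ [i]
  if PySem.Str.isIn "class" i then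
    (st.1 + 1, (st.2.1).insert (PySem.Int.toStr st.1) rule_set, [])
  else (st.1, st.2.1, rule_set)

def extract_rules (rules : List String) : List (String × List String) :=
  ((((rules.foldl pvStepLine ([], [])).2).foldl pvStepGroup (0, PySem.Dict.empty, [])).2.1).items

-- ===== PORT B =====
def pvKeep (t : String) : Bool := t != "|" && t != "-"

-- B's phase-1 while loop: cut `rest` at the first "\n" token, repeat
def pvAltLines (rest : List String) : List String :=
  if h : "\n" ∈ rest then
    let j : Nat := (PySem.List.index? rest "\n").getD 0
    PySem.Str.lstrip (PySem.Str.join ""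
        ((PySem.List.slice rest none (some (j : Int))).filter pvKeep))
      :: pvAltLines (PySem.List.slice rest (some ((j : Int) + 1)) none)
  else []
termination_by rest.length
decreasing_by
  have hcast : ((j : Int) + 1) = (((j + 1 : Nat)) : Int) := by push_cast; ring
  rw [hcast, PySem.List.slice_from_natCast]
  have hpos : 0 < rest.length := List.length_pos_of_mem h
  simp only [List.length_drop]
  omega

-- B's phase-2 loop step over enumerate(lines) (state: rule_sets, start, n)
def pvAltStep (lines : List String) (st : PySem.Dict String (List String) × Int × Int)
    (p : Int × String) : PySem.Dict String (List String) × Int × Int :=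
  if PySem.Str.isIn "class" p.2 then
    ((st.1).insert (PySem.Int.toStr st.2.2)
        (PySem.List.slice lines (some st.2.1) (some (p.1 + 1))), p.1 + 1, st.2.2 + 1)
  else st

def extract_rules_alt (rules : List String) : List (String × List String) :=
  (((PySem.List.enumerate (pvAltLines rules) 0).foldl (pvAltStep (pvAltLines rules))
      (PySem.Dict.empty, 0, 0)).1).items

-- ===== PRECONDITION & SPEC =====
def Spec_extract_rules (rules : List String) (out : List (String × List String)) : Prop := out = extract_rules_alt rules
instance (rules : List String) (out : List (String × List String)) : Decidable (Spec_extract_rules rules out) := by unfold Spec_extract_rules; infer_instance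

-- ===== CLAIM (what is proved, stated in full; the proofs are below) =====
def Claim_equal_extract_rules : Prop := ∀ (rules : List String), Dom_extract_rules rules → Spec_extract_rules rules (extract_rules rules)

-- ===== LEMMAS AND PROOFS =====

-- A's phase-1 fold, normalized: result lines = lines ++ pvAuxLines line xs
def pvAuxLines (line : List String) (xs : List String) : List String :=
  match xs with
  | [] => []
  | i :: ts =>
    if i = "\n" then PySem.Str.lstrip (PySem.Str.join "" line) :: pvAuxLines [] ts
    else pvAuxLines (if pvKeep i then line ++ [i] else line) ts

theorem foldl_stepLine (xs : List String) : ∀ (line lines : List String),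
    (xs.foldl pvStepLine (line, lines)).2 = lines ++ pvAuxLines line xs := by
  induction xs with
  | nil => intro line lines; simp [pvAuxLines]
  | cons i ts ih =>
    intro line lines
    by_cases hi : i = "\n"
    · subst hi
      simp [pvStepLine, pvAuxLines, ih]
    · have hk : (if i ≠ "\n" ∧ ¬ (i = "|") ∧ ¬ (i = "-") then line ++ [i] else line)
          = (if pvKeep i then line ++ [i] else line) := by
        by_cases h1 : i = "|" <;> by_cases h2 : i = "-" <;>
          simp [pvKeep, hi, h1, h2]
      simp only [List.foldl_cons, pvStepLine, hk]
      rw [if_neg hi]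
      simp only [pvAuxLines, if_neg hi]
      exact ih _ lines

theorem pvAuxLines_no_nl (xs : List String) : ∀ line, "\n" ∉ xs → pvAuxLines line xs = [] := by
  induction xs with
  | nil => intro line _; simp [pvAuxLines]
  | cons i ts ih =>
    intro line h
    have hi : i ≠ "\n" := fun he => h (by simp [he])
    have hts : "\n" ∉ ts := fun ht => h (by simp [ht])
    simp only [pvAuxLines, if_neg (fun he => hi he)]
    exact ih _ hts

theorem pvAuxLines_decompose (pre : List String) : ∀ (line suf : List String), "\n" ∉ pre →
    pvAuxLines line (pre ++ "\n" :: suf)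
      = PySem.Str.lstrip (PySem.Str.join "" (line ++ pre.filter pvKeep)) :: pvAuxLines [] suf := by
  induction pre with
  | nil => intro line suf _; simp [pvAuxLines]
  | cons p ps ih =>
    intro line suf h
    have hp : p ≠ "\n" := fun he => h (by simp [he])
    have hps : "\n" ∉ ps := fun ht => h (by simp [ht])
    simp only [List.cons_append, pvAuxLines, if_neg (fun he => hp he)]
    rw [ih _ suf hps]
    by_cases hk : pvKeep p <;> simp [hk]

theorem pvAuxLines_eq_alt : ∀ (n : Nat) (xs : List String), xs.length ≤ n →
    pvAuxLines [] xs = pvAltLines xs := by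
  intro n
  induction n with
  | zero =>
    intro xs hx
    have : xs = [] := List.length_eq_zero_iff.mp (Nat.le_zero.mp hx)
    subst this
    rw [pvAltLines]
    simp [pvAuxLines]
  | succ m ih =>
    intro xs hx
    rw [pvAltLines]
    by_cases h : "\n" ∈ xs
    · rw [dif_pos h]
      have hsome : (PySem.List.index? xs "\n").isSome := (PySem.List.index?_isSome_iff _ _).mpr h
      obtain ⟨j, hj⟩ := Option.isSome_iff_exists.mp hsome
      obtain ⟨pre, suf, hdec, hlen, hnin⟩ := (PySem.List.index?_eq_some_iff _ _ _).mp hj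
      simp only [hj, Option.getD_some]
      have hcast : ((j : Int) + 1) = (((j + 1 : Nat)) : Int) := by push_cast; ring
      rw [hcast, PySem.List.slice_to_natCast, PySem.List.slice_from_natCast]
      have htake : xs.take j = pre := by
        rw [hdec, ← hlen]; exact List.take_left' rfl
      have hdrop : xs.drop (j + 1) = suf := by
        rw [hdec]
        have : pre ++ "\n" :: suf = (pre ++ ["\n"]) ++ suf := by simp
        rw [this]
        have hl : (pre ++ ["\n"]).length = j + 1 := by simp [hlen]
        rw [← hl]; exact List.drop_left
      rw [htake, hdrop, hdec, pvAuxLines_decompose pre [] suf hnin]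
      have hsuf : suf.length ≤ m := by
        have := hx
        rw [hdec] at this
        simp at this
        omega
      rw [ih suf hsuf]
      simp
    · rw [dif_neg h]
      exact pvAuxLines_no_nl xs [] h

-- phase 2: A's fold over the remaining lines equals B's fold over enumerate,
-- with A's pending rule_set = lines[start:k]
theorem foldl_group_eq (lines : List String) : ∀ (suffix : List String) (k a : Nat)
    (d : PySem.Dict String (List String)) (c : Int),
    suffix = lines.drop k → a ≤ k →
    (suffix.foldl pvStepGroup (c, d, PySem.List.slice lines (some (a : Int)) (some (k : Int)))).2.1
      = ((PySem.List.enumerate suffix (k : Int)).foldl (pvAltStep lines) (d, (a : Int), c)).1 := by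
  intro suffix
  induction suffix with
  | nil => intro k a d c _ _; simp [PySem.List.enumerate]
  | cons i ts ih =>
    intro k a d c hsuf hak
    have hklt : k < lines.length := by
      by_contra hge
      have : lines.drop k = [] := List.drop_eq_nil_of_le (Nat.le_of_not_lt hge)
      rw [← hsuf] at this; exact List.cons_ne_nil _ _ this
    have hi : lines[k] = i := by
      have h2 : (lines.drop k).head? = some i := by rw [← hsuf]; rfl
      rw [List.head?_drop] at h2
      exact (List.getElem?_eq_some_iff.mp h2).2
    have hts : ts = lines.drop (k + 1) := by
      have h2 := congrArg List.tail hsuf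
      simpa [List.tail_drop] using h2
    have happ : PySem.List.slice lines (some (a : Int)) (some (k : Int)) ++ [i]
        = PySem.List.slice lines (some (a : Int)) (some ((k + 1 : Nat) : Int)) := by
      rw [PySem.List.slice_natCast, PySem.List.slice_natCast]
      have hk1 : k + 1 - a = (k - a) + 1 := by omega
      rw [hk1, List.take_add_one]
      have hidx : (lines.drop a)[k - a]? = some i := by
        rw [List.getElem?_drop]
        have : a + (k - a) = k := by omega
        rw [this, List.getElem?_eq_getElem hklt, hi]
      rw [hidx]
      rfl
    rw [PySem.List.enumerate_cons]
    simp only [List.foldl_cons]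
    by_cases hcl : PySem.Str.isIn "class" i = true
    · simp only [pvStepGroup, pvAltStep, hcl]
      simp only [happ]
      have hempty : ([] : List String)
          = PySem.List.slice lines (some ((k + 1 : Nat) : Int)) (some ((k + 1 : Nat) : Int)) := by
        rw [PySem.List.slice_natCast]; simp
      have hcast1 : ((k : Int) + 1) = (((k + 1 : Nat)) : Int) := by push_cast; ring
      rw [hcast1, hempty]
      exact ih (k+1) (k+1) _ (c+1) hts (le_refl _)
    · rw [Bool.not_eq_true] at hcl
      simp only [pvStepGroup, pvAltStep, hcl, if_false, Bool.false_eq_true]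
      simp only [happ]
      have hcast1 : ((k : Int) + 1) = (((k + 1 : Nat)) : Int) := by push_cast; ring
      rw [hcast1]
      exact ih (k+1) a _ c hts (by omega)

-- ===== VERDICT (by name: the statement is the Claim_ definition above) =====
theorem extract_rules_spec : Claim_equal_extract_rules := by
  intro rules _
  unfold Spec_extract_rules extract_rules extract_rules_alt
  have h1 : (rules.foldl pvStepLine ([], [])).2 = pvAltLines rules := by
    rw [foldl_stepLine]
    simpa using pvAuxLines_eq_alt rules.length rules (le_refl _)
  rw [h1]
  have h2 := foldl_group_eq (pvAltLines rules) (pvAltLines rules) 0 0 PySem.Dict.empty 0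
    (by simp) (le_refl _)
  have h3 : PySem.List.slice (pvAltLines rules) (some ((0 : Nat) : Int)) (some ((0 : Nat) : Int))
      = [] := by rw [PySem.List.slice_natCast]; simp
  rw [h3] at h2
  simp only [Nat.cast_zero] at h2
  rw [h2]
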